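-- pv_equiv track=rewrite | github.com/pmjoniak/popy | testy/WDI5.py | fTiter
-- ===== SOURCE A (Python) =====
-- def fTiter(n, m):
-- 	L = (n + m + 1) * [0]
-- 	for i in range(n + m):
-- 		for j in range(i + 1, -1, -1):
-- 			xm = j
-- 			xn = i + 1 - j
-- 			if j == i + 1:
-- 				L[j] = L[j - 1] + 1
-- 			elif j == 0:
-- 				L[j] = L[j] + 1
-- 			else:
-- 				L[j] = L[j] + 2 * L[j - 1]
-- 			if xn == n and xm == m:
-- 				return L[j]
-- ===== SOURCE B (Python) =====
-- def fTiter(n, m):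
--     # Row-by-row DP on the n x m rectangle: f(0,b)=b, f(a,0)=a,
--     # f(a,b) = f(a-1,b) + 2*f(a,b-1); returns f(n,m).
--     row = list(range(m + 1))
--     for a in range(1, n + 1):
--         prev = a
--         new = [a]
--         for b in range(1, m + 1):
--             prev = row[b] + 2 * prev
--             new.append(prev)
--         row = new
--     return row[m]
-- ===== Notes on version B (the rewrite author's own statement) =====
-- stated objective: alternative
-- what changed: A sweeps every antidiagonal of the whole (n+m)-square, updating one shared array in place in descending column order with an early-return check after every cell; B computes the same recurrence row by row over just the (n+1)x(m+1) rectangle and reads off the last entry.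
-- outside the precondition, e.g. on fTiter(0, 0): A returns None, B returns 0; on fTiter(-1, 3): A returns None, B returns 3
import Mathlib
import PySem

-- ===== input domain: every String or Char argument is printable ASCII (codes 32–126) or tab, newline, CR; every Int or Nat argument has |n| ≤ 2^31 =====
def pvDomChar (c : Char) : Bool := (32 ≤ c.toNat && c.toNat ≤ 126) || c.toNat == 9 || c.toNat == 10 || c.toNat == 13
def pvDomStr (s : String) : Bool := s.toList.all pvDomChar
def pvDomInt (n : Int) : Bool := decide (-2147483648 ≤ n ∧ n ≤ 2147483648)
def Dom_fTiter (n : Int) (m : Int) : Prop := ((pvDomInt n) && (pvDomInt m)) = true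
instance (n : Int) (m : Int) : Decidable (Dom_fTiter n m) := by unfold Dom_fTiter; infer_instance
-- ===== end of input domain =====

-- B replaces A's antidiagonal in-place sweep (with early return) of the whole
-- (n+m)-square by a row-by-row DP over just the n×m rectangle; same return value
-- on every input where A returns (Pre_).

-- ===== PORT A =====
-- A's inner loop runs j = i+1, i, ..., 0 (range(i+1, -1, -1)).
def aDown : Nat → List Nat
  | 0 => [0]
  | k + 1 => (k + 1) :: aDown k

-- the three-way branch A uses to update L[j] on diagonal i.
-- List indexing via getD 0: exact, since under Pre_ every index A reads/writes is in range
-- (the L[j-1] of the j==0 branch is never evaluated by Python either).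
def aVal (i j : Nat) (L : List Int) : Int :=
  if j = i + 1 then L.getD (j - 1) 0 + 1
  else if j = 0 then L.getD j 0 + 1
  else L.getD j 0 + 2 * L.getD (j - 1) 0

-- one inner loop of A: updates L in place, early-returns L[j] when (xn, xm) = (n, m)
def aInner (n : Int) (m : Int) (i : Nat) : List Int → List Nat → List Int × Option Int
  | L, [] => (L, none)
  | L, j :: js =>
      let L' := L.set j (aVal i j L)
      if ((i : Int) + 1 - (j : Int) = n ∧ (j : Int) = m) then (L', some (L'.getD j 0))
      else aInner n m i L' js

-- the outer loop over i in range(n+m), threading L, stopping on the early return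
def aLoop (n : Int) (m : Int) : List Nat → List Int → Option Int
  | [], _ => none
  | i :: is, L =>
      match aInner n m i L (aDown (i + 1)) with
      | (_, some r) => some r
      | (L', none) => aLoop n m is L'

-- Python falls off the end and returns None when the loops never hit (n,m);
-- those inputs are excluded by Pre_ (the .getD 0 stands in for None there).
def fTiter (n : Int) (m : Int) : Int :=
  (aLoop n m (List.range' 0 (n + m).toNat) (List.replicate ((n + m + 1).toNat) 0)).getD 0

-- ===== PORT B =====
-- inner loop of B: for b in range(1, m+1): prev = row[b] + 2*prev; new.append(prev)
def bInner (row : List Int) : List Nat → Int → List Int → Int × List Int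
  | [], prev, new => (prev, new)
  | b :: bs, prev, new =>
      let p := row.getD b 0 + 2 * prev
      bInner row bs p (new ++ [p])

-- outer loop of B: for a in range(1, n+1): build the next row from the previous one
def bOuter (m : Int) : List Nat → List Int → List Int
  | [], row => row
  | a :: as, row => bOuter m as (bInner row (List.range' 1 m.toNat) (a : Int) [(a : Int)]).2

def fTiter_alt (n : Int) (m : Int) : Int :=
  (bOuter m (List.range' 1 n.toNat)
      ((List.range ((m + 1).toNat)).map (fun (b : Nat) => (b : Int)))).getD m.toNat 0

-- ===== PRECONDITION & SPEC =====
-- Pre_ excludes exactly the inputs where Python A returns None (not an int):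
-- n < 0, m < 0, or n = m = 0 — there the loops never reach (xn, xm) = (n, m).
def Pre_fTiter (n : Int) (m : Int) : Prop := 0 ≤ n ∧ 0 ≤ m ∧ 0 < n + m
instance (n : Int) (m : Int) : Decidable (Pre_fTiter n m) := by unfold Pre_fTiter; infer_instance

def pvWitness_fTiter : Int × Int := (3, 2)

def Spec_fTiter (n : Int) (m : Int) (out : Int) : Prop := out = fTiter_alt n m
instance (n : Int) (m : Int) (out : Int) : Decidable (Spec_fTiter n m out) := by
  unfold Spec_fTiter; infer_instance

-- ===== CLAIM (what is proved, stated in full; the proofs are below) =====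
def Claim_equal_fTiter : Prop :=
  ∀ (n : Int) (m : Int), Dom_fTiter n m → Pre_fTiter n m → Spec_fTiter n m (fTiter n m)

-- ===== LEMMAS AND PROOFS =====

-- the mathematical value both programs compute: f(0,b)=b, f(a,0)=a, f(a,b)=f(a-1,b)+2·f(a,b-1)
def F : Nat → Nat → Int
  | 0, b => (b : Int)
  | a + 1, 0 => (a : Int) + 1
  | a + 1, b + 1 => F a (b + 1) + 2 * F (a + 1) b

lemma F_zero_left (b : Nat) : F 0 b = (b : Int) := by cases b <;> simp [F]

lemma F_zero_right (a : Nat) : F a 0 = (a : Int) := by cases a <;> simp [F]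

lemma getD_set_ne (L : List Int) (k j : Nat) (v : Int) (h : j ≠ k) :
    (L.set k v).getD j 0 = L.getD j 0 := by
  simp [List.getD, List.getElem?_set_ne (Ne.symm h)]

lemma getD_set_self (L : List Int) (k : Nat) (v : Int) (h : k < L.length) :
    (L.set k v).getD k 0 = v := by
  simp [List.getD, h]

lemma getD_map_range (f : Nat → Int) (n j : Nat) (h : j < n) :
    ((List.range n).map f).getD j 0 = f j := by
  simp [List.getD, h]

-- ===== A-side lemmas =====

-- the update A performs at column k of diagonal i produces F (i+1-k) k
lemma aStep_value (i k : Nat) (L : List Int) (hk : k ≤ i + 1)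
    (hold : ∀ j, j ≤ i → j ≤ k → L.getD j 0 = F (i - j) j) :
    aVal i k L = F (i + 1 - k) k := by
  unfold aVal
  by_cases h1 : k = i + 1
  · subst h1
    rw [if_pos rfl]
    simp only [Nat.add_sub_cancel]
    rw [hold i le_rfl (by omega)]
    have e1 : i - i = 0 := Nat.sub_self i
    have e2 : i + 1 - (i + 1) = 0 := by omega
    rw [e1, e2, F_zero_left, F_zero_left]
    push_cast; ring
  · rw [if_neg h1]
    by_cases h0 : k = 0
    · subst h0
      rw [if_pos rfl, hold 0 (by omega) (by omega)]
      simp only [Nat.sub_zero, F_zero_right]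
      push_cast; ring
    · rw [if_neg h0]
      have hki : k ≤ i := by omega
      rw [hold k hki le_rfl, hold (k - 1) (by omega) (by omega)]
      obtain ⟨b, rfl⟩ : ∃ b, k = b + 1 := ⟨k - 1, by omega⟩
      have e1 : i + 1 - (b + 1) = (i - (b + 1)) + 1 := by omega
      have e2 : i - b = i - (b + 1) + 1 := by omega
      have e3 : b + 1 - 1 = b := by omega
      rw [e1, e3, e2, F]

-- inner loop on a non-final diagonal ((i:ℤ)+1 ≠ n+m): no early return, L updated in place
lemma aInner_none (n m : Int) (i : Nat) (hne : (i : Int) + 1 ≠ n + m) :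
    ∀ (k : Nat) (L : List Int), k ≤ i + 1 → i + 1 < L.length →
    (∀ j, j ≤ i → j ≤ k → L.getD j 0 = F (i - j) j) →
    (∀ j, k < j → j ≤ i + 1 → L.getD j 0 = F (i + 1 - j) j) →
    ∃ L', aInner n m i L (aDown k) = (L', none) ∧ L'.length = L.length ∧
      ∀ j, j ≤ i + 1 → L'.getD j 0 = F (i + 1 - j) j := by
  intro k
  induction k with
  | zero =>
      intro L _ hlen hold hnew
      refine ⟨L.set 0 (aVal i 0 L), ?_, by simp, ?_⟩
      · simp only [aDown, aInner]
        split_ifs with hc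
        · exfalso; obtain ⟨ha, hb⟩ := hc; apply hne; push_cast at ha hb ⊢; omega
        · rfl
      · intro j hj
        by_cases hj0 : j = 0
        · subst hj0
          rw [getD_set_self _ _ _ (by omega), aStep_value i 0 L (by omega) hold]
        · rw [getD_set_ne _ _ _ _ hj0]
          exact hnew j (by omega) hj
  | succ k ih =>
      intro L hk hlen hold hnew
      have hv := aStep_value i (k + 1) L (by omega) hold
      obtain ⟨L', hL', hlen', hinv⟩ :=
        ih (L.set (k + 1) (aVal i (k + 1) L)) (by omega) (by simpa using hlen)
          (fun j hji hjk => by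
            rw [getD_set_ne _ _ _ _ (by omega)]; exact hold j hji (by omega))
          (fun j hjk hji => by
            by_cases hje : j = k + 1
            · subst hje
              rw [getD_set_self _ _ _ (by omega), hv]
            · rw [getD_set_ne _ _ _ _ hje]
              exact hnew j (by omega) hji)
      refine ⟨L', ?_, by simpa using hlen', hinv⟩
      simp only [aDown, aInner]
      split_ifs with hc
      · exfalso; obtain ⟨ha, hb⟩ := hc; apply hne; push_cast at ha hb ⊢; omega
      · exact hL'

-- inner loop on the final diagonal: the early return fires at j = m with value F n m
lemma aInner_hit (n m : Int) (i : Nat) (hi : (i : Int) + 1 = n + m) (hn : 0 ≤ n) (hm : 0 ≤ m) :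
    ∀ (d : Nat) (L : List Int), m.toNat + d ≤ i + 1 → i + 1 < L.length →
    (∀ j, j ≤ i → j ≤ m.toNat + d → L.getD j 0 = F (i - j) j) →
    (aInner n m i L (aDown (m.toNat + d))).2 = some (F n.toNat m.toNat) := by
  intro d
  induction d with
  | zero =>
      intro L hk hlen hold
      have hv := aStep_value i (m.toNat + 0) L (by omega) hold
      have hval : (L.set (m.toNat + 0) (aVal i (m.toNat + 0) L)).getD (m.toNat + 0) 0
          = F n.toNat m.toNat := by
        rw [getD_set_self _ _ _ (by omega), hv]
        have : i + 1 - (m.toNat + 0) = n.toNat := by omega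
        rw [this]
        norm_num
      cases hk' : m.toNat + 0 with
      | zero =>
          rw [hk'] at hval
          simp only [aDown, aInner]
          split_ifs with hc
          · simpa using hval
          · exfalso; apply hc; constructor <;> push_cast <;> omega
      | succ t =>
          rw [hk'] at hval
          simp only [aDown, aInner]
          split_ifs with hc
          · simpa using hval
          · exfalso; apply hc; constructor <;> push_cast <;> omega
  | succ d ih =>
      intro L hk hlen hold
      have harr : m.toNat + (d + 1) = (m.toNat + d) + 1 := by omega
      rw [harr] at hk hold ⊢
      simp only [aDown, aInner]
      split_ifs with hc
      · exfalso; obtain ⟨_, hb⟩ := hc; push_cast at hb; omega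
      · exact ih (L.set ((m.toNat + d) + 1) (aVal i ((m.toNat + d) + 1) L)) (by omega)
          (by simpa using hlen)
          (fun j hji hjk => by
            rw [getD_set_ne _ _ _ _ (by omega)]
            exact hold j hji (by omega))

-- the outer loop threads the invariant from diagonal s to the final diagonal
lemma aLoop_spec (n m : Int) (hn : 0 ≤ n) (hm : 0 ≤ m) :
    ∀ (r s : Nat) (L : List Int), 1 ≤ r → (s : Int) + (r : Int) = n + m →
    L.length = (n + m).toNat + 1 →
    (∀ j, j ≤ s → L.getD j 0 = F (s - j) j) →
    aLoop n m (List.range' s r) L = some (F n.toNat m.toNat) := by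
  intro r
  induction r with
  | zero => omega
  | succ r ih =>
      intro s L _ hsum hlen hold
      rw [List.range'_succ]
      simp only [aLoop]
      by_cases hr : r = 0
      · -- final diagonal: s + 1 = n + m
        subst hr
        have hi : (s : Int) + 1 = n + m := by push_cast at hsum ⊢; omega
        have hd : s + 1 = m.toNat + (s + 1 - m.toNat) := by omega
        have hhit := aInner_hit n m s hi hn hm (s + 1 - m.toNat) L (by omega)
          (by omega) (fun j hj _ => hold j hj)
        rw [← hd] at hhit
        rcases hA : aInner n m s L (aDown (s + 1)) with ⟨L', o⟩
        rw [hA] at hhit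
        simp only at hhit
        rw [hhit]
      · -- not final: run aInner_none and recurse
        have hne : (s : Int) + 1 ≠ n + m := by push_cast at hsum; omega
        obtain ⟨L', hL', hlen', hinv⟩ := aInner_none n m s hne (s + 1) L le_rfl (by omega)
          (fun j hji _ => hold j hji) (fun j hjk hji => by omega)
        rw [hL']
        exact ih (s + 1) L' (by omega) (by push_cast at hsum ⊢; omega)
          (by omega) (fun j hj => hinv j hj)

lemma fTiter_eq_F (n m : Int) (hn : 0 ≤ n) (hm : 0 ≤ m) (hpos : 0 < n + m) :
    fTiter n m = F n.toNat m.toNat := by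
  unfold fTiter
  rw [aLoop_spec n m hn hm (n + m).toNat 0 _ (by omega) (by push_cast; omega)
    (by rw [List.length_replicate]; omega)
    (fun j hj => by
      have hj0 : j = 0 := by omega
      subst hj0
      have hlt : 0 < (n + m + 1).toNat := by omega
      rw [show (0 : Int) = ((0 : Nat) : Int) from rfl]
      simp [List.getD, hlt, F])]
  rfl

-- ===== B-side lemmas =====

lemma bInner_spec (m' a : Nat) (row : List Int)
    (hrow : row = (List.range (m' + 1)).map (fun b => F a b)) :
    ∀ (r s : Nat), 1 ≤ s → s + r = m' + 1 →
    bInner row (List.range' s r) (F (a + 1) (s - 1))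
        ((List.range s).map (fun b => F (a + 1) b)) =
      (F (a + 1) m', (List.range (m' + 1)).map (fun b => F (a + 1) b)) := by
  intro r
  induction r with
  | zero =>
      intro s hs hsum
      have hsm : s = m' + 1 := by omega
      subst hsm
      simp only [List.range'_zero, bInner, Nat.add_sub_cancel]
  | succ r ih =>
      intro s hs hsum
      rw [List.range'_succ]
      simp only [bInner]
      have hrowb : row.getD s 0 = F a s := by
        rw [hrow]; exact getD_map_range _ _ _ (by omega)
      have hstep : row.getD s 0 + 2 * F (a + 1) (s - 1) = F (a + 1) s := by
        rw [hrowb]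
        obtain ⟨b, rfl⟩ : ∃ b, s = b + 1 := ⟨s - 1, by omega⟩
        simp only [Nat.add_sub_cancel]
        rw [F]
      rw [hstep]
      have hnew : ((List.range s).map (fun b => F (a + 1) b)) ++ [F (a + 1) s] =
          (List.range (s + 1)).map (fun b => F (a + 1) b) := by
        rw [List.range_succ, List.map_append]; rfl
      have hprev : F (a + 1) s = F (a + 1) ((s + 1) - 1) := by norm_num
      rw [hnew, hprev]
      exact ih (s + 1) (by omega) (by omega)

lemma bOuter_spec (m : Int) (m' : Nat) (hm : m.toNat = m') :
    ∀ (k a : Nat) (row : List Int),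
    row = (List.range (m' + 1)).map (fun b => F a b) →
    bOuter m (List.range' (a + 1) k) row = (List.range (m' + 1)).map (fun b => F (a + k) b) := by
  intro k
  induction k with
  | zero => intro a row hrow; simpa [bOuter] using hrow
  | succ k ih =>
      intro a row hrow
      rw [List.range'_succ]
      simp only [bOuter]
      have hsingle : [((a + 1 : Nat) : Int)] = (List.range 1).map (fun b => F (a + 1) b) := by
        simp [List.range_one, F_zero_right]
      have hrow' : (bInner row (List.range' 1 m.toNat) ((a + 1 : Nat) : Int)
            [((a + 1 : Nat) : Int)]).2 = (List.range (m' + 1)).map (fun b => F (a + 1) b) := by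
        rcases Nat.eq_zero_or_pos m' with h0 | hpos
        · rw [hm, h0]
          simp only [List.range'_zero, bInner]
          rw [hsingle]
        · have hcast : ((a + 1 : Nat) : Int) = F (a + 1) (1 - 1) := by
            rw [show (1 : Nat) - 1 = 0 from rfl, F_zero_right]
          rw [hm, hsingle, hcast]
          rw [bInner_spec m' a row hrow m' 1 le_rfl (by omega)]
      rw [hrow']
      have hk : a + (k + 1) = (a + 1) + k := by omega
      rw [hk]
      exact ih (a + 1) _ rfl

lemma fTiter_alt_eq_F (n m : Int) (hm : 0 ≤ m) :
    fTiter_alt n m = F n.toNat m.toNat := by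
  unfold fTiter_alt
  have hm1 : (m + 1).toNat = m.toNat + 1 := by omega
  have hrow0 : (List.range ((m + 1).toNat)).map (fun (b : Nat) => (b : Int)) =
      (List.range (m.toNat + 1)).map (fun b => F 0 b) := by
    rw [hm1]
    apply List.map_congr_left
    intro b _
    rw [F_zero_left]
  have h1 : (1 : Nat) = 0 + 1 := rfl
  rw [hrow0, h1, bOuter_spec m m.toNat rfl n.toNat 0 _ rfl]
  rw [getD_map_range _ _ _ (by omega)]
  norm_num

-- ===== VERDICT (by name: the statement is the Claim_ definition above) =====
theorem fTiter_spec : Claim_equal_fTiter := by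
  intro n m _ hpre
  obtain ⟨hn, hm, hpos⟩ := hpre
  unfold Spec_fTiter
  rw [fTiter_eq_F n m hn hm hpos, fTiter_alt_eq_F n m hm]
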